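-- pv_equiv track=rewrite | github.com/openmorphics/DCH | dch_core/interfaces.py | is_temporally_admissible
-- ===== SOURCE A (Python) =====
-- from typing import (
--     Any,
--     Callable,
--     Dict,
--     Iterable,
--     List,
--     Mapping,
--     MutableMapping,
--     Optional,
--     Protocol,
--     Sequence,
--     Set,
--     Tuple,
--     runtime_checkable,
--     NewType,
-- )
--
-- Timestamp = int  # microseconds or dataset-native time unit
--
-- def is_temporally_admissible(
--     tail_times: Sequence[Timestamp],
--     head_time: Timestamp,
--     delta_min: int,
--     delta_max: int,
-- ) -> bool:
--     """Check if every presyn timestamp satisfies head_time - delta_max <= t_i <= head_time - delta_min."""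
--     lower = head_time - delta_max
--     upper = head_time - delta_min
--     return all((lower <= ti <= upper) for ti in tail_times)
-- ===== SOURCE B (Python) =====
-- def is_temporally_admissible(tail_times, head_time, delta_min, delta_max):
--     if not tail_times:
--         return True
--     s = sorted(tail_times)
--     return head_time - delta_max <= s[0] and s[-1] <= head_time - delta_min
-- ===== Notes on version B (the rewrite author's own statement) =====
-- stated objective: alternative
-- what changed: Instead of testing every element with a short-circuiting all(), B sorts a copy of the timestamps and checks only the two endpoints of the sorted order (s[0] and s[-1]) against the window bounds, with an explicit empty-list guard.
import Mathlib
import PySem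

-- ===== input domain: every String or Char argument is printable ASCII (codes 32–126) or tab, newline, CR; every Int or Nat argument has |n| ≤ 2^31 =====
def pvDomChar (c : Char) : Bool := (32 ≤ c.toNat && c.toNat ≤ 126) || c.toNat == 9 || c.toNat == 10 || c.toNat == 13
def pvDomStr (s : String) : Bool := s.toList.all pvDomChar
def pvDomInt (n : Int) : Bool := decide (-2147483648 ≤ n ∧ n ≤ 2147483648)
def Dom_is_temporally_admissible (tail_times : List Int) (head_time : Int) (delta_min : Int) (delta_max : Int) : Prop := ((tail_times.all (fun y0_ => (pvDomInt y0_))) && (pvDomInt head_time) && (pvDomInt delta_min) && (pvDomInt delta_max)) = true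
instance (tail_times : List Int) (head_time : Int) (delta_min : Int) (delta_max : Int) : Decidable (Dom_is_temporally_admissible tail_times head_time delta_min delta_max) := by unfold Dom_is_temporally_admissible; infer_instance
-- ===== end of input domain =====

-- B sorts a copy of the timestamps and checks only the endpoints of the sorted order against the
-- window bounds, instead of A's per-element all() test (alternative algorithm, not faster).

-- ===== PORT A =====
def is_temporally_admissible (tail_times : List Int) (head_time : Int) (delta_min : Int) (delta_max : Int) : Bool :=
  let lower := head_time - delta_max
  let upper := head_time - delta_min
  tail_times.all (fun ti => decide (lower ≤ ti) && decide (ti ≤ upper))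

-- ===== PORT B =====
-- B: empty guard; s = sorted(tail_times); compare s[0] and s[-1] with the bounds.
-- (s is a permutation of the non-empty input, so it is non-empty: the [] branch is unreachable,
-- and s[0] / s[-1] are the head and getLast of the match.)
def is_temporally_admissible_alt (tail_times : List Int) (head_time : Int) (delta_min : Int) (delta_max : Int) : Bool :=
  match tail_times with
  | [] => true
  | _ :: _ =>
    match PySem.List.sorted tail_times (fun x => x) false with
    | [] => true
    | m :: t => decide (head_time - delta_max ≤ m) && decide (t.getLastD m ≤ head_time - delta_min)

-- ===== PRECONDITION & SPEC =====
def Spec_is_temporally_admissible (tail_times : List Int) (head_time : Int) (delta_min : Int) (delta_max : Int) (out : Bool) : Prop := out = is_temporally_admissible_alt tail_times head_time delta_min delta_max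
instance (tail_times : List Int) (head_time : Int) (delta_min : Int) (delta_max : Int) (out : Bool) : Decidable (Spec_is_temporally_admissible tail_times head_time delta_min delta_max out) := by unfold Spec_is_temporally_admissible; infer_instance

-- ===== CLAIM (what is proved, stated in full; the proofs are below) =====
def Claim_equal_is_temporally_admissible : Prop := ∀ (tail_times : List Int) (head_time : Int) (delta_min : Int) (delta_max : Int), Dom_is_temporally_admissible tail_times head_time delta_min delta_max → Spec_is_temporally_admissible tail_times head_time delta_min delta_max (is_temporally_admissible tail_times head_time delta_min delta_max)

-- ===== LEMMAS AND PROOFS =====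

-- in a ≤-pairwise list, every element is at most the last element
theorem le_getLastD_of_pairwise (m : Int) (t : List Int)
    (hp : (m :: t).Pairwise (fun a b => a ≤ b)) :
    ∀ y ∈ m :: t, y ≤ t.getLastD m := by
  induction t generalizing m with
  | nil => intro y hy; simp at hy; simp [hy]
  | cons b bs ih =>
    intro y hy
    rcases List.mem_cons.mp hy with rfl | hy'
    · have hmb : y ≤ b := (List.pairwise_cons.mp hp).1 b (by simp)
      have := ih b (List.pairwise_cons.mp hp).2 b (by simp)
      rw [List.getLastD_cons]; exact le_trans hmb this
    · have := ih b (List.pairwise_cons.mp hp).2 y hy'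
      rw [List.getLastD_cons]; exact this

theorem window_eq (xs : List Int) (lo hi m : Int) (t : List Int)
    (hs : PySem.List.sorted xs (fun x => x) false = m :: t) :
    xs.all (fun ti => decide (lo ≤ ti) && decide (ti ≤ hi))
      = (decide (lo ≤ m) && decide (t.getLastD m ≤ hi)) := by
  have hmem : ∀ y : Int, y ∈ m :: t ↔ y ∈ xs := by
    intro y; rw [← hs]; exact PySem.List.mem_sorted xs (fun x => x) false y
  have hmin : ∀ y ∈ xs, m ≤ y := PySem.List.key_head_sorted_le xs (fun x => x) hs
  have hp : (m :: t).Pairwise (fun a b => a ≤ b) := by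
    have := PySem.List.sorted_pairwise (xs := xs) (key := fun x : Int => x)
    rwa [hs] at this
  have hmax : ∀ y ∈ xs, y ≤ t.getLastD m := fun y hy =>
    le_getLastD_of_pairwise m t hp y ((hmem y).mpr hy)
  have hmmem : m ∈ xs := (hmem m).mp (by simp)
  have hlmem : t.getLastD m ∈ xs := (hmem _).mp (by
    rcases t.eq_nil_or_concat with rfl | ⟨ys, a, rfl⟩
    · simp
    · simp)
  apply Bool.eq_iff_iff.mpr
  simp only [List.all_eq_true, Bool.and_eq_true, decide_eq_true_eq]
  constructor
  · intro h
    exact ⟨(h m hmmem).1, (h _ hlmem).2⟩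
  · intro ⟨h1, h2⟩ ti hti
    exact ⟨le_trans h1 (hmin ti hti), le_trans (hmax ti hti) h2⟩

-- ===== VERDICT =====
theorem is_temporally_admissible_spec : Claim_equal_is_temporally_admissible := by
  intro tail_times head_time delta_min delta_max _
  unfold Spec_is_temporally_admissible is_temporally_admissible is_temporally_admissible_alt
  cases tail_times with
  | nil => simp
  | cons x xs =>
    cases hs : PySem.List.sorted (x :: xs) (fun x => x) false with
    | nil => exact absurd ((PySem.List.sorted_eq_nil_iff (x :: xs) (fun x => x) false).mp hs) (by simp)
    | cons m t => exact window_eq (x :: xs) _ _ m t hs
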